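-- pv_equiv track=rewrite | github.com/ArshiaRx/Computer-Science-I | labs109.py | riffle
-- ===== SOURCE A (Python) =====
-- def riffle(items, out=True):
--
--     result = []   #result is a list
--
--     if items == []:     #if items is a list return as a list
--         return []
--
--     #half of total lenght of items
--     half = len(items) // 2
--
--
--     if out == True:
--         #if out is true
--         first_half = items[:half]     #first half is anyhing until half lenght
--         second_half = items[half:]  #second half is anything from half lenght to end
--
--     elif out != True:       #else OR elif out != True OR out == False:
--         first_half = items[half:]     #first half is anything after half lenght to end
--         second_half = items[:half]   #second half is anything until half lenght
--
-- #^generally speaking first and second half will be opposite depends on out result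
--
--     for i in range(half):
--     #append first and second half on the range of the index of half to the result
--         result.append(first_half[i])
--         result.append(second_half[i])
--
--     return result
-- ===== SOURCE B (Python) =====
-- def riffle(items, out=True):
--     # Gather by output position: no halves are materialised and there is no
--     # interleaving merge; each output slot j reads its source index directly:
--     # the source of slot j is j//2, shifted by half when slot parity disagrees
--     # with the riffle direction.
--     half = len(items) // 2
--     return [items[j // 2 + (half if (j % 2 == 1) == out else 0)]
--             for j in range(2 * half)]
-- ===== Notes on version B (the rewrite author's own statement) =====
-- stated objective: alternative
-- what changed: A splits the list into two halves and merges them with an interleaving loop; B never builds halves: it maps over output positions and computes each slot's source index arithmetically (j//2 plus a parity-dependent half offset), a gather by index formula.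
import Mathlib
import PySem

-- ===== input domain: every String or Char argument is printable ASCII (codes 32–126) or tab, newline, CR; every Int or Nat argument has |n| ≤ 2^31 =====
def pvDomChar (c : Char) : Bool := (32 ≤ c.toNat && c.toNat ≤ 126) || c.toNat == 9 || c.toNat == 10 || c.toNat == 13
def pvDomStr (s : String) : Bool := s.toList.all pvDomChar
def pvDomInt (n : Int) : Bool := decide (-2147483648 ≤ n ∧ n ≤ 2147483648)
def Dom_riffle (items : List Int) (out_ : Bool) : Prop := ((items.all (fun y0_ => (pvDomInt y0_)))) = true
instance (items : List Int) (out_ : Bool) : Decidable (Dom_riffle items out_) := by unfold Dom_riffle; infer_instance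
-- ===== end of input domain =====

-- B replaces A's split-into-halves-and-interleave loop by a gather over output
-- positions whose source index is computed arithmetically; objective: alternative, same O(n) cost.

-- ===== PORT A =====
-- Indexing first_half[i]/second_half[i] is always in range (i < half ≤ length of each half),
-- so pyGetD with default 0 is exact here.
def riffle (items : List Int) (out_ : Bool) : List Int :=
  let result : List Int := []
  if items == ([] : List Int) then []
  else
    let half : Int := PySem.Int.floordiv (items.length : Int) 2
    let first_half := if out_ then PySem.List.slice items none (some half)
                      else PySem.List.slice items (some half) none
    let second_half := if out_ then PySem.List.slice items (some half) none
                       else PySem.List.slice items none (some half)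
    (PySem.List.pyRange 0 half 1).foldl
      (fun r i => r ++ [PySem.List.pyGetD first_half i 0, PySem.List.pyGetD second_half i 0]) result

-- ===== PORT B =====
-- items[j//2 + (half if (j%2==1)==out else 0)] is always in range (index < 2*half ≤ length),
-- so pyGetD with default 0 is exact here.
def riffle_alt (items : List Int) (out_ : Bool) : List Int :=
  let half : Nat := items.length / 2
  (PySem.List.pyRange 0 ((2 * half : Nat) : Int) 1).map (fun j =>
    PySem.List.pyGetD items
      (PySem.Int.floordiv j 2 + (if (PySem.Int.mod j 2 == 1) == out_ then (half : Int) else 0)) 0)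

-- ===== PRECONDITION & SPEC =====
def Spec_riffle (items : List Int) (out_ : Bool) (out : List Int) : Prop := out = riffle_alt items out_
instance (items : List Int) (out_ : Bool) (out : List Int) : Decidable (Spec_riffle items out_ out) := by unfold Spec_riffle; infer_instance

-- ===== CLAIM (what is proved, stated in full; the proofs are below) =====
def Claim_equal_riffle : Prop := ∀ (items : List Int) (out_ : Bool), Dom_riffle items out_ → Spec_riffle items out_ (riffle items out_)

-- ===== LEMMAS AND PROOFS =====

-- A's interleaving loop over range(n) appends a[i], b[i] at each step; unrolled from the right.
lemma interleave_foldl (n : Nat) (a b : List Int) (acc : List Int) :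
    (PySem.List.pyRange 0 (n : Int) 1).foldl
      (fun r i => r ++ [PySem.List.pyGetD a i 0, PySem.List.pyGetD b i 0]) acc
    = acc ++ (List.range n).flatMap (fun k => [a.getD k 0, b.getD k 0]) := by
  induction n generalizing acc with
  | zero => simp
  | succ k ih =>
    have h1 : ((k : Int) + 1) = ((k + 1 : Nat) : Int) := by push_cast; ring
    rw [← h1, PySem.List.pyRange_one_succ_right (by positivity), List.foldl_append,
      ih acc, List.range_succ, List.flatMap_append]
    simp [List.foldl, PySem.List.pyGetD_natCast]

-- B's gather map over range(2n), split into pairs of consecutive positions.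
lemma gather_map (n : Nat) (f : Int → Int) :
    (PySem.List.pyRange 0 ((2 * n : Nat) : Int) 1).map f
    = (List.range n).flatMap (fun k => [f ((2 * k : Nat) : Int), f ((2 * k + 1 : Nat) : Int)]) := by
  induction n with
  | zero => simp
  | succ k ih =>
    have h2 : ((2 * (k + 1) : Nat) : Int) = ((2 * k + 1 : Nat) : Int) + 1 := by push_cast; ring
    have h1 : ((2 * k + 1 : Nat) : Int) = ((2 * k : Nat) : Int) + 1 := by push_cast; ring
    rw [h2, PySem.List.pyRange_one_succ_right (by positivity), h1,
      PySem.List.pyRange_one_succ_right (by positivity), ← h1]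
    rw [List.map_append, List.map_append, ih, List.range_succ, List.flatMap_append]
    simp

-- ===== VERDICT (by name: the statement is the Claim_ definition above) =====
theorem riffle_spec : Claim_equal_riffle := by
  intro items out_ _
  unfold Spec_riffle riffle riffle_alt
  by_cases hnil : items = []
  · subst hnil; cases out_ <;> simp
  · simp only [beq_iff_eq, hnil, if_false]
    have hfd : PySem.Int.floordiv (items.length : Int) 2
        = ((items.length / 2 : Nat) : Int) := by
      exact_mod_cast PySem.Int.floordiv_natCast items.length 2
    set h := items.length / 2 with hh
    rw [hfd, gather_map h, interleave_foldl h]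
    simp only [List.nil_append]
    apply List.flatMap_congr
    intro k hk
    rw [List.mem_range] at hk
    have h2c : (2 : Int) = ((2 : Nat) : Int) := rfl
    have e1 : PySem.Int.floordiv ((2 * k : Nat) : Int) 2 = (k : Int) := by
      rw [h2c, PySem.Int.floordiv_natCast]; norm_cast; omega
    have e2 : PySem.Int.floordiv ((2 * k + 1 : Nat) : Int) 2 = (k : Int) := by
      rw [h2c, PySem.Int.floordiv_natCast]; norm_cast; omega
    have m1 : PySem.Int.mod ((2 * k : Nat) : Int) 2 = 0 := by
      rw [h2c, PySem.Int.mod_natCast]; norm_cast; omega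
    have m2 : PySem.Int.mod ((2 * k + 1 : Nat) : Int) 2 = 1 := by
      rw [h2c, PySem.Int.mod_natCast]; norm_cast; omega
    have hslice_to : PySem.List.slice items none (some ((h : Nat) : Int)) = items.take h :=
      PySem.List.slice_to_natCast items h
    have hslice_from : PySem.List.slice items (some ((h : Nat) : Int)) none = items.drop h :=
      PySem.List.slice_from_natCast items h
    have hkh : k < (items.take h).length := by simp [List.length_take]; omega
    have hkd : k < (items.drop h).length := by simp [List.length_drop]; omega
    have gt1 : (items.take h)[k]?.getD 0 = items[k]?.getD 0 := by
      rw [List.getElem?_take_of_lt (by omega)]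
    have gt2 : items[k + h]?.getD 0 = PySem.List.pyGetD items ((k : Int) + (h : Int)) 0 := by
      rw [show ((k : Int) + (h : Int)) = ((k + h : Nat) : Int) by push_cast; ring,
        PySem.List.pyGetD_natCast, List.getD_eq_getElem?_getD]
    cases out_ <;>
      simp only [hslice_to, hslice_from, if_true, if_false, Bool.false_eq_true,
        e1, e2, m1, m2] <;>
      simp [PySem.List.pyGetD_natCast, gt1, gt2, List.getElem?_drop, Nat.add_comm]
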